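-- pv_equiv track=rewrite | github.com/AnderssonProgramming/AYED-resources | BIBLE/parcial1/AYED/Arenas/Arena_1/Punto3.py | one_matrix
-- ===== SOURCE A (Python) =====
-- def one_matrix(b_list, size):
--     matrix = [[0 for i in range(size)] for j in range(size)]
--     index = 0
--     for row in range(size):
--         for column in range(size):
--             if b_list[index] == 'T':
--                 matrix[row][column] = 1
--             else:
--                 matrix[row][column] = -1
--             index += 1
--     return inner_product(matrix, size)
--
-- def inner_product(matrix, size):
--     status = True
--     product = 0
--     for row in range(size-1):
--         for column in range(size):
--             product = product + matrix[row][column]*matrix[row+1][column]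
--         if product != 0:
--             status = False
--     return status
-- ===== SOURCE B (Python) =====
-- def one_matrix(b_list, size):
--     rows = [{c for c in range(size) if b_list[r * size + c] == 'T'}
--             for r in range(size)]
--     return all(2 * len(a ^ b) == size for a, b in zip(rows, rows[1:]))
-- ===== Notes on version B (the rewrite author's own statement) =====
-- stated objective: alternative
-- what changed: B abandons the +-1 matrix and running-product arithmetic entirely: it encodes each row as the set of columns holding 'T' and checks via symmetric differences that each pair of consecutive sets disagrees in exactly half the columns (2*len(a^b) == size), which equals the dot product of the +-1 rows being 0.
import Mathlib
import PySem

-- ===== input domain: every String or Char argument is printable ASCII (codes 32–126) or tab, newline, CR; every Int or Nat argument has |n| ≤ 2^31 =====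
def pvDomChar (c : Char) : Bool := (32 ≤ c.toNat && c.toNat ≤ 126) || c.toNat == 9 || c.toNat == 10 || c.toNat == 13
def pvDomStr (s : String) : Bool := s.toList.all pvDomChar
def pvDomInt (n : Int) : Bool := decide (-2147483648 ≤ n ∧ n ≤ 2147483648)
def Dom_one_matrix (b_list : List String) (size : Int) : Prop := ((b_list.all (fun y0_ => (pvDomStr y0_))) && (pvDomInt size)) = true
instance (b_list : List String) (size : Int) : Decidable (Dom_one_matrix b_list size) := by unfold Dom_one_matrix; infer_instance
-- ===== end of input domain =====

-- B drops A's ±1 matrix and running-product arithmetic entirely: it represents each row as the SET of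
-- columns holding 'T' and checks, via symmetric differences of consecutive sets, that each pair mismatches
-- in exactly half the columns (simpler; return value only, no argument is mutated).

-- ===== PORT A =====
-- A-side helper: transliteration of A's inner_product (status flag + cumulative product).
-- matrix[row] / matrix[row][column]: row, column come from range(...) and are in range, so pyGetD is exact.
def inner_product (matrix : List (List Int)) (size : Int) : Bool :=
  let st := (PySem.List.pyRange 0 (size - 1) 1).foldl
    (fun (st : Bool × Int) row =>
      let product := (PySem.List.pyRange 0 size 1).foldl
        (fun p column =>
          p + PySem.List.pyGetD (PySem.List.pyGetD matrix row []) column 0 *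
              PySem.List.pyGetD (PySem.List.pyGetD matrix (row + 1) []) column 0) st.2
      (if product ≠ 0 then false else st.1, product))
    (true, 0)
  st.1

-- b_list[index]: Pre_one_matrix keeps index in range (otherwise Python raises IndexError), so pyGetD is exact;
-- matrix[row][column] = v is ported as the functional write pySetD (row, column are in range).
def one_matrix (b_list : List String) (size : Int) : Bool :=
  let matrix0 : List (List Int) :=
    (PySem.List.pyRange 0 size 1).map (fun _j => (PySem.List.pyRange 0 size 1).map (fun _i => (0 : Int)))
  let st := (PySem.List.pyRange 0 size 1).foldl
    (fun (st : List (List Int) × Int) row =>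
      (PySem.List.pyRange 0 size 1).foldl
        (fun (st : List (List Int) × Int) column =>
          let v : Int := if PySem.List.pyGetD b_list st.2 "" = "T" then 1 else -1
          (PySem.List.pySetD st.1 row (PySem.List.pySetD (PySem.List.pyGetD st.1 row []) column v),
           st.2 + 1))
        st)
    (matrix0, 0)
  inner_product st.1 size

-- ===== PORT B =====
-- B-side helper: the set comprehension {c for c in range(size) if b_list[r*size+c] == 'T'}.
-- b_list[...]: Pre_one_matrix keeps the indices in range, so pyGetD is exact.
def tSet (b_list : List String) (size r : Int) : PySem.Set Int :=
  PySem.Set.ofList ((PySem.List.pyRange 0 size 1).filter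
    (fun c => PySem.List.pyGetD b_list (r * size + c) "" == "T"))

-- rows[1:] is PySem.List.slice rows (some 1) none; len(a ^ b) is Set.len (Set.symmDiff a b).
def one_matrix_alt (b_list : List String) (size : Int) : Bool :=
  let rows := (PySem.List.pyRange 0 size 1).map (tSet b_list size)
  (rows.zip (PySem.List.slice rows (some 1) none)).all
    (fun p => 2 * PySem.Set.len (PySem.Set.symmDiff p.1 p.2) == size)

-- ===== PRECONDITION & SPEC =====
-- Pre_ excludes exactly the inputs where Python A raises IndexError: size ≥ 1 with fewer than size² entries.
def Pre_one_matrix (b_list : List String) (size : Int) : Prop :=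
  size ≤ 0 ∨ size * size ≤ (b_list.length : Int)
instance (b_list : List String) (size : Int) : Decidable (Pre_one_matrix b_list size) := by
  unfold Pre_one_matrix; infer_instance
def pvWitness_one_matrix : List String × Int := (["T", "F", "F", "T"], 2)

def Spec_one_matrix (b_list : List String) (size : Int) (out : Bool) : Prop := out = one_matrix_alt b_list size
instance (b_list : List String) (size : Int) (out : Bool) : Decidable (Spec_one_matrix b_list size out) := by unfold Spec_one_matrix; infer_instance

-- ===== CLAIM (what is proved, stated in full; the proofs are below) =====
def Claim_equal_one_matrix : Prop := ∀ (b_list : List String) (size : Int), Dom_one_matrix b_list size → Pre_one_matrix b_list size → Spec_one_matrix b_list size (one_matrix b_list size)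

-- ===== LEMMAS AND PROOFS =====

def fV (b : List String) (i : Int) : Int := if PySem.List.pyGetD b i "" = "T" then 1 else -1
def filledRow (b : List String) (size r : Int) : List Int :=
  (PySem.List.pyRange 0 size 1).map (fun c => fV b (r * size + c))
def zeroRowL (size : Int) : List Int := (PySem.List.pyRange 0 size 1).map (fun _ => (0 : Int))
def Mpart (b : List String) (size k : Int) : List (List Int) :=
  (PySem.List.pyRange 0 size 1).map (fun r => if r < k then filledRow b size r else zeroRowL size)

lemma pyGetD_pySetD_self {α : Type} (m : List α) (i : Int) (x d : α)
    (h0 : 0 ≤ i) (h1 : i < (m.length : Int)) :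
    PySem.List.pyGetD (PySem.List.pySetD m i x) i d = x := by
  rw [PySem.List.pySetD_of_nonneg m x h0,
      PySem.List.pyGetD_eq_getElem _ d h0 (by simpa using h1)]
  rw [List.getElem_set_self]

lemma pySetD_pySetD_self {α : Type} (m : List α) (i : Int) (x y : α) (h0 : 0 ≤ i) :
    PySem.List.pySetD (PySem.List.pySetD m i x) i y = PySem.List.pySetD m i y := by
  rw [PySem.List.pySetD_of_nonneg m x h0, PySem.List.pySetD_of_nonneg _ y h0,
      PySem.List.pySetD_of_nonneg m y h0, List.set_set]

lemma pySetD_pyGetD_self {α : Type} (m : List α) (i : Int) (d : α)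
    (h0 : 0 ≤ i) (h1 : i < (m.length : Int)) :
    PySem.List.pySetD m i (PySem.List.pyGetD m i d) = m := by
  rw [PySem.List.pyGetD_eq_getElem _ d h0 h1, PySem.List.pySetD_of_nonneg m _ h0]
  exact List.set_getElem_self (by omega)

-- the inner (column) loop on the matrix commutes to a loop on the row alone
lemma inner_commute (b : List String) :
    ∀ (cs : List Int) (m : List (List Int)) (row i0 : Int),
    0 ≤ row → row < (m.length : Int) →
    cs.foldl
      (fun (st : List (List Int) × Int) column =>
        let v : Int := if PySem.List.pyGetD b st.2 "" = "T" then 1 else -1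
        (PySem.List.pySetD st.1 row (PySem.List.pySetD (PySem.List.pyGetD st.1 row []) column v),
         st.2 + 1)) (m, i0)
    = (PySem.List.pySetD m row
        ((cs.foldl (fun (st : List Int × Int) c => (PySem.List.pySetD st.1 c (fV b st.2), st.2 + 1))
          (PySem.List.pyGetD m row [], i0)).1),
       (cs.foldl (fun (st : List Int × Int) c => (PySem.List.pySetD st.1 c (fV b st.2), st.2 + 1))
          (PySem.List.pyGetD m row [], i0)).2) := by
  intro cs
  induction cs with
  | nil => intro m row i0 h0 h1; simp [pySetD_pyGetD_self m row [] h0 h1]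
  | cons c cs ih =>
    intro m row i0 h0 h1
    simp only [List.foldl_cons]
    rw [ih _ row (i0 + 1) h0 (by rw [PySem.List.length_pySetD]; exact h1)]
    rw [pyGetD_pySetD_self m row _ [] h0 h1]
    rw [pySetD_pySetD_self m row _ _ h0]
    rfl

lemma take_set_succ {α : Type} (l : List α) (k : Nat) (v : α) (h : k < l.length) :
    (l.set k v).take (k + 1) = l.take k ++ [v] := by
  rw [List.set_eq_take_cons_drop v h, List.take_append]
  simp [Nat.min_eq_left h.le]

-- the row loop fills positions a.. with fV values, index tracking the column
lemma rowfold (b : List String) :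
    ∀ (j : Nat) (a bnd : Int) (r : List Int) (i0 : Int), bnd = (r.length : Int) → 0 ≤ a → a ≤ bnd →
    j = (bnd - a).toNat →
    (PySem.List.pyRange a bnd 1).foldl
      (fun (st : List Int × Int) c => (PySem.List.pySetD st.1 c (fV b st.2), st.2 + 1)) (r, i0)
    = (r.take a.toNat ++ (PySem.List.pyRange a bnd 1).map (fun c => fV b (i0 + (c - a))),
       i0 + (bnd - a)) := by
  intro j
  induction j with
  | zero =>
    intro a bnd r i0 hbnd h0 h1 hj
    subst hbnd
    have ha : a = (r.length : Int) := by omega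
    rw [PySem.List.pyRange_one_eq_nil (by omega)]
    rw [ha]
    simp
  | succ j ih =>
    intro a bnd r i0 hbnd h0 h1 hj
    subst hbnd
    have hlt : a < (r.length : Int) := by omega
    rw [PySem.List.pyRange_one_cons hlt]
    simp only [List.foldl_cons, List.map_cons]
    have hlenN : (PySem.List.pySetD r a (fV b i0)).length = r.length :=
      PySem.List.length_pySetD r a (fV b i0)
    have key := ih (a + 1) ((PySem.List.pySetD r a (fV b i0)).length : Int)
      (PySem.List.pySetD r a (fV b i0)) (i0 + 1) rfl (by omega)
      (by rw [hlenN]; omega) (by rw [hlenN]; omega)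
    rw [hlenN] at key
    rw [key]
    simp only [Prod.mk.injEq]
    refine ⟨?_, by ring⟩
    have h2 : (a + 1).toNat = a.toNat + 1 := by omega
    rw [h2, PySem.List.pySetD_of_nonneg r _ h0, take_set_succ r a.toNat (fV b i0) (by omega)]
    rw [List.append_assoc]
    congr 1
    simp only [List.singleton_append]
    congr 1
    · congr 1; omega
    apply List.map_congr_left
    intro c _
    congr 1
    omega

lemma length_Mpart (b : List String) (size k : Int) :
    ((Mpart b size k).length : Int) = max size 0 := by
  unfold Mpart
  rw [List.length_map, PySem.List.length_pyRange_one]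
  omega

lemma pyGetD_Mpart (b : List String) (size k r : Int) (h0 : 0 ≤ r) (h1 : r < size) :
    PySem.List.pyGetD (Mpart b size k) r [] =
      (if r < k then filledRow b size r else zeroRowL size) := by
  unfold Mpart
  rw [PySem.List.pyGetD_map_pyRange_of_nonneg _ size r _ h0 h1]

lemma pySetD_Mpart (b : List String) (size k : Int) (h0 : 0 ≤ k) (_h1 : k < size) :
    PySem.List.pySetD (Mpart b size k) k (filledRow b size k) = Mpart b size (k + 1) := by
  unfold Mpart
  rw [PySem.List.pySetD_of_nonneg _ _ h0]
  apply List.ext_getElem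
  · simp
  intro i hi1 hi2
  rw [List.getElem_set]
  simp only [List.getElem_map, PySem.List.getElem_pyRange_one]
  have hb : (i : Int) + 0 = i := by omega
  split_ifs with he hlt1 hlt2 hlt3 <;>
    first
      | rfl
      | (congr 1; omega)

def sDot (b : List String) (size row : Int) : Int :=
  ((PySem.List.pyRange 0 size 1).map
    (fun c => fV b (row * size + c) * fV b ((row + 1) * size + c))).sum

-- outer (row) loop of A's fill
lemma outerfold (b : List String) (size : Int) :
    ∀ (j : Nat) (k : Int), 0 ≤ k → k ≤ size → j = (size - k).toNat →
    (PySem.List.pyRange k size 1).foldl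
      (fun (st : List (List Int) × Int) row =>
        (PySem.List.pyRange 0 size 1).foldl
          (fun (st : List (List Int) × Int) column =>
            let v : Int := if PySem.List.pyGetD b st.2 "" = "T" then 1 else -1
            (PySem.List.pySetD st.1 row (PySem.List.pySetD (PySem.List.pyGetD st.1 row []) column v),
             st.2 + 1)) st)
      (Mpart b size k, k * size)
    = (Mpart b size size, size * size) := by
  intro j
  induction j with
  | zero =>
    intro k h0 h1 hj
    have hk : k = size := by omega
    subst hk
    rw [PySem.List.pyRange_one_eq_nil (le_refl _)]
    rfl
  | succ j ih =>
    intro k h0 h1 hj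
    have hlt : k < size := by omega
    rw [PySem.List.pyRange_one_cons hlt, List.foldl_cons]
    rw [inner_commute b (PySem.List.pyRange 0 size 1) (Mpart b size k) k (k * size) h0
      (by rw [show ((Mpart b size k).length : Int) = max size 0 from length_Mpart b size k]; omega)]
    rw [pyGetD_Mpart b size k k h0 hlt, if_neg (lt_irrefl k)]
    have hzr : size = ((zeroRowL size).length : Int) := by
      unfold zeroRowL
      rw [List.length_map, PySem.List.length_pyRange_one]
      omega
    rw [rowfold b ((size - 0).toNat) 0 size (zeroRowL size) (k * size) hzr (le_refl 0)
      (by omega) rfl]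
    simp only [Int.toNat_zero, List.take_zero, List.nil_append, sub_zero]
    rw [show (PySem.List.pyRange 0 size 1).map (fun c => fV b (k * size + c))
        = filledRow b size k from rfl,
      pySetD_Mpart b size k h0 hlt]
    have harith : k * size + size = (k + 1) * size := by ring
    rw [harith]
    exact ih (k + 1) (by omega) (by omega) (by omega)

-- A's whole fill produces the fully filled matrix
lemma one_matrix_eq_inner (b : List String) (size : Int) (hs : 0 ≤ size) :
    one_matrix b size = inner_product (Mpart b size size) size := by
  unfold one_matrix
  have hm0 : (PySem.List.pyRange 0 size 1).map
      (fun _j => (PySem.List.pyRange 0 size 1).map (fun _i => (0 : Int)))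
      = Mpart b size 0 := by
    unfold Mpart
    apply List.map_congr_left
    intro r hr
    rw [PySem.List.mem_pyRange_one] at hr
    rw [if_neg (by omega)]
    rfl
  dsimp only
  rw [hm0]
  have H := outerfold b size size.toNat 0 (le_refl 0) hs (by omega)
  rw [zero_mul] at H
  rw [H]

-- A's inner_product on the filled matrix, with the per-pair dot products made explicit
lemma inner_product_eq (b : List String) (size : Int) :
    inner_product (Mpart b size size) size
    = ((PySem.List.pyRange 0 (size - 1) 1).foldl
        (fun (st : Bool × Int) row =>
          (if st.2 + sDot b size row ≠ 0 then false else st.1, st.2 + sDot b size row))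
        (true, 0)).1 := by
  unfold inner_product
  dsimp only
  congr 1
  apply PySem.List.foldl_congr_mem
  intro acc row hrow
  rw [PySem.List.mem_pyRange_one] at hrow
  have h0 : 0 ≤ row := hrow.1
  have h1 : row < size - 1 := hrow.2
  have hr : PySem.List.pyGetD (Mpart b size size) row [] = filledRow b size row := by
    rw [pyGetD_Mpart b size size row h0 (by omega), if_pos (by omega)]
  have hr1 : PySem.List.pyGetD (Mpart b size size) (row + 1) [] = filledRow b size (row + 1) := by
    rw [pyGetD_Mpart b size size (row + 1) (by omega) (by omega), if_pos (by omega)]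
  rw [hr, hr1]
  rw [PySem.List.foldl_congr_mem (PySem.List.pyRange 0 size 1) _
    (fun p c => p + fV b (row * size + c) * fV b ((row + 1) * size + c)) acc.2
    (by
      intro p c hc
      rw [PySem.List.mem_pyRange_one] at hc
      unfold filledRow
      rw [PySem.List.pyGetD_map_pyRange_of_nonneg _ size c 0 hc.1 hc.2,
          PySem.List.pyGetD_map_pyRange_of_nonneg _ size c 0 hc.1 hc.2])]
  rw [PySem.List.foldl_add]
  rfl

-- all cumulative sums are 0 iff every summand is 0 (the status/product loop)
lemma foldl_status_false (S : Int → Int) :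
    ∀ (rs : List Int) (p : Int),
    (rs.foldl (fun (st : Bool × Int) row =>
      (if st.2 + S row ≠ 0 then false else st.1, st.2 + S row)) (false, p)).1 = false := by
  intro rs
  induction rs with
  | nil => intro p; rfl
  | cons r t ih =>
    intro p
    simp only [List.foldl_cons]
    show (List.foldl _ (if p + S r ≠ 0 then false else false, p + S r) t).1 = false
    rw [ite_self]
    exact ih (p + S r)

lemma foldl_status (S : Int → Int) :
    ∀ (rs : List Int),
    (rs.foldl (fun (st : Bool × Int) row =>
      (if st.2 + S row ≠ 0 then false else st.1, st.2 + S row)) (true, 0)).1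
    = rs.all (fun r => S r == 0) := by
  intro rs
  induction rs with
  | nil => rfl
  | cons r t ih =>
    simp only [List.foldl_cons, List.all_cons]
    show (List.foldl _ (if 0 + S r ≠ 0 then false else true, 0 + S r) t).1
      = ((S r == 0) && t.all fun r => S r == 0)
    rw [zero_add]
    by_cases h : S r = 0
    · rw [h, if_neg (by simp)]
      rw [ih]
      simp
    · rw [if_pos h]
      rw [foldl_status_false S t (S r)]
      simp [h]

-- ===== B-side lemmas =====

-- zipping a range with its own tail pairs each r with r+1
lemma zip_range_tail :
    ∀ (j : Nat) (a b : Int), j = (b - a).toNat →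
    (PySem.List.pyRange a b 1).zip (PySem.List.pyRange a b 1).tail
      = (PySem.List.pyRange a (b - 1) 1).map (fun r => (r, r + 1)) := by
  intro j
  induction j with
  | zero =>
    intro a b hj
    rw [PySem.List.pyRange_one_eq_nil (by omega), PySem.List.pyRange_one_eq_nil (by omega)]
    rfl
  | succ j ih =>
    intro a b hj
    have hab : a < b := by omega
    rw [PySem.List.pyRange_one_cons hab]
    by_cases h2 : a + 1 < b
    · have ht : (PySem.List.pyRange (a + 1) b 1).tail = PySem.List.pyRange (a + 1 + 1) b 1 := by
        rw [PySem.List.pyRange_one_cons h2, List.tail_cons]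
      rw [PySem.List.pyRange_one_cons (by omega : a < b - 1)]
      simp only [List.tail_cons, List.map_cons]
      rw [PySem.List.pyRange_one_cons h2]
      simp only [List.zip_cons_cons]
      rw [← PySem.List.pyRange_one_cons h2, ← ht, ih (a + 1) b (by omega)]
    · rw [PySem.List.pyRange_one_eq_nil (by omega : b ≤ a + 1),
          PySem.List.pyRange_one_eq_nil (by omega : b - 1 ≤ a)]
      rfl

-- the two one-sided disagreement counts add up to the full disagreement count
lemma countP_split (p q : Int → Bool) :
    ∀ l : List Int,
    l.countP (fun c => p c && !q c) + l.countP (fun c => q c && !p c)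
      = l.countP (fun c => p c != q c) := by
  intro l
  induction l with
  | nil => rfl
  | cons x t ih =>
    simp only [List.countP_cons]
    cases hp : p x <;> cases hq : q x <;> simp [hp, hq] <;> omega

-- length of the symmetric difference of two filters of one duplicate-free list = #disagreements
lemma symmDiff_filter_len (l : List Int) (hn : l.Nodup) (p q : Int → Bool) :
    (PySem.Set.symmDiff (PySem.Set.ofList (l.filter p)) (PySem.Set.ofList (l.filter q))).length
      = l.countP (fun c => p c != q c) := by
  rw [PySem.Set.ofList_eq_self_of_nodup _ (hn.filter p),
      PySem.Set.ofList_eq_self_of_nodup _ (hn.filter q)]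
  show ((l.filter p).filter (fun x => !(l.filter q).contains x) ++
        (l.filter q).filter (fun x => !(l.filter p).contains x)).length
      = l.countP (fun c => p c != q c)
  have hc : ∀ (r s : Int → Bool), (l.filter r).countP (fun x => !(l.filter s).contains x)
      = l.countP (fun c => r c && !s c) := by
    intro r s
    rw [List.countP_filter]
    apply List.countP_congr
    intro c hcm
    simp [List.contains_eq_mem, List.mem_filter, hcm, and_comm]
  rw [List.length_append, ← List.countP_eq_length_filter, ← List.countP_eq_length_filter,
      hc p q, hc q p]
  exact countP_split p q l

-- a ±1 sum over l equals length minus twice the number of -1 terms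
lemma sum_pm_one (e : Int → Bool) :
    ∀ (l : List Int),
    ((l.map (fun c => if e c then (1 : Int) else -1)).sum)
      = (l.length : Int) - 2 * (l.countP (fun c => !e c) : Int) := by
  intro l
  induction l with
  | nil => rfl
  | cons x t ih =>
    simp only [List.map_cons, List.sum_cons, List.countP_cons, List.length_cons]
    rw [ih]
    cases hx : e x <;> simp [hx] <;> push_cast <;> ring

-- pointwise: B's set condition on rows (r, r+1) is exactly sDot = 0
lemma pair_cond_eq (b : List String) (size r : Int) (hs : 0 ≤ size) :
    (2 * PySem.Set.len (PySem.Set.symmDiff (tSet b size r) (tSet b size (r + 1))) == size)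
      = (sDot b size r == 0) := by
  unfold tSet
  have hlen := symmDiff_filter_len (PySem.List.pyRange 0 size 1)
    (PySem.List.nodup_pyRange_one 0 size)
    (fun c => PySem.List.pyGetD b (r * size + c) "" == "T")
    (fun c => PySem.List.pyGetD b ((r + 1) * size + c) "" == "T")
  have hdot : sDot b size r
      = ((PySem.List.pyRange 0 size 1).length : Int)
        - 2 * (((PySem.List.pyRange 0 size 1).countP
            (fun c => !((PySem.List.pyGetD b (r * size + c) "" == "T")
                        == (PySem.List.pyGetD b ((r + 1) * size + c) "" == "T")))) : Int) := by
    unfold sDot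
    rw [← sum_pm_one (fun c => (PySem.List.pyGetD b (r * size + c) "" == "T")
          == (PySem.List.pyGetD b ((r + 1) * size + c) "" == "T"))]
    congr 1
    apply List.map_congr_left
    intro c _
    unfold fV
    by_cases h1 : PySem.List.pyGetD b (r * size + c) "" = "T" <;>
      by_cases h2 : PySem.List.pyGetD b ((r + 1) * size + c) "" = "T" <;>
      simp [h1, h2]
  have hrlen : ((PySem.List.pyRange 0 size 1).length : Int) = size := by
    rw [PySem.List.length_pyRange_one]; omega
  have hcnt : ((PySem.List.pyRange 0 size 1).countP
        (fun c => (PySem.List.pyGetD b (r * size + c) "" == "T")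
                  != (PySem.List.pyGetD b ((r + 1) * size + c) "" == "T")))
      = ((PySem.List.pyRange 0 size 1).countP
        (fun c => !((PySem.List.pyGetD b (r * size + c) "" == "T")
                    == (PySem.List.pyGetD b ((r + 1) * size + c) "" == "T")))) := by
    apply List.countP_congr
    intro c _
    simp [bne]
  unfold PySem.Set.len
  rw [hlen, hcnt, hdot, hrlen]
  rw [Bool.eq_iff_iff]
  simp only [beq_iff_eq]
  omega

lemma one_matrix_alt_eq (b : List String) (size : Int) (hs : 0 ≤ size) :
    one_matrix_alt b size
      = (PySem.List.pyRange 0 (size - 1) 1).all (fun r => sDot b size r == 0) := by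
  unfold one_matrix_alt
  dsimp only
  rw [PySem.List.slice_from_one]
  rw [← List.map_tail, List.zip_map, zip_range_tail (size - 0).toNat 0 size (by omega)]
  simp only [List.map_map, List.all_map]
  exact List.all_congr rfl (fun r => pair_cond_eq b size r hs)

lemma one_matrix_eq_alt (b_list : List String) (size : Int) :
    one_matrix b_list size = one_matrix_alt b_list size := by
  by_cases hs : 0 ≤ size
  · rw [one_matrix_eq_inner b_list size hs, inner_product_eq b_list size,
        foldl_status (sDot b_list size) (PySem.List.pyRange 0 (size - 1) 1),
        one_matrix_alt_eq b_list size hs]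
  · unfold one_matrix one_matrix_alt inner_product
    rw [PySem.List.pyRange_one_eq_nil (by omega : size ≤ 0),
        PySem.List.pyRange_one_eq_nil (by omega : size - 1 ≤ 0)]
    rfl

-- ===== VERDICT (by name: the statement is the Claim_ definition above) =====
theorem one_matrix_spec : Claim_equal_one_matrix := by
  intro b_list size _ _
  unfold Spec_one_matrix
  exact one_matrix_eq_alt b_list size
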